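-- pv_equiv track=rewrite | github.com/oktamov/sinonimayzer | synonym/views.py | getArrByText
-- ===== SOURCE A (Python) =====
-- def removeFirstSpaces(text):
--     for i in range(len(text)):
--         if text[i] != ' ':
--             return text[i:]
--     return text
--
-- def getArrByText(text):
--     arr = []
--     text = removeFirstSpaces(text) + ' '
--     word = ''
--     chars = ''
--
--     cur = 0
--     for c in text:
--         if c.isalpha() or c.isdigit() or c == '\'':
--             if cur == 0:
--                 arr.append(chars)
--             word += c
--             chars = ''
--             cur = 1
--         else:
--             if cur == 1:
--                 arr.append(word)
--             cur = 0
--             chars += c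
--             word = ''
--
--     arr.append(chars)
--     if len(arr) > 1:
--         arr[-1] = arr[-1][:-1]
--     return arr
-- ===== SOURCE B (Python) =====
-- def removeFirstSpaces(text):
--     return text.lstrip(' ') or text
--
--
-- def getArrByText(text):
--     t = removeFirstSpaces(text) + ' '
--
--     def isw(c):
--         return c.isalpha() or c.isdigit() or c == '\''
--
--     # decompose t into maximal runs of same word/non-word class
--     arr = []
--     i = 0
--     n = len(t)
--     while i < n:
--         j = i + 1
--         while j < n and isw(t[j]) == isw(t[i]):
--             j += 1
--         arr.append(t[i:j])
--         i = j
--     if isw(t[0]):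
--         arr = [''] + arr
--     if len(arr) > 1:
--         arr[-1] = arr[-1][:-1]
--     return arr
-- ===== Notes on version B (the rewrite author's own statement) =====
-- stated objective: simpler
-- what changed: Replaces A's char-by-char state machine (mode flag cur plus two flush-on-transition accumulators word/chars) by first slicing the text into maximal same-class runs and then reshaping the run list (prepend '' when the text starts with a word run, trim the sentinel space); removeFirstSpaces becomes lstrip-or.
import Mathlib
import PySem

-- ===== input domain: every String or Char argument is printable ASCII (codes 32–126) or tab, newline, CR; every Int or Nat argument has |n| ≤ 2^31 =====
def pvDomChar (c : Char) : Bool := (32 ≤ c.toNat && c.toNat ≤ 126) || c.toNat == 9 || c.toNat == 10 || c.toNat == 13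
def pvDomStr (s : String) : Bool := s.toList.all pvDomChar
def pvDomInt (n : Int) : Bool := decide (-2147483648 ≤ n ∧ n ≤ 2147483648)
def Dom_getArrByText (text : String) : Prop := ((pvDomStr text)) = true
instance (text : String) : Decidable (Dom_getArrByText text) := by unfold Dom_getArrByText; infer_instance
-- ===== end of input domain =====

-- B changes the decomposition: instead of A's char-by-char state machine with mode flag and
-- two accumulators, B first strips via lstrip-or, then slices t into maximal same-class runs
-- and reshapes (prepend '' for a word start, trim the sentinel space). Objective: simpler.

-- ===== PORT A =====
-- A's removeFirstSpaces: for i in range(len(text)): if text[i] != ' ': return text[i:]; return text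
def pvRfsAGo (l : List Char) (i : Nat) : List Char :=
  if h : i < l.length then
    if l[i] ≠ ' ' then l.drop i else pvRfsAGo l (i + 1)
  else l
termination_by l.length - i

def pvRemoveFirstSpacesA (l : List Char) : List Char := pvRfsAGo l 0

-- c.isalpha() or c.isdigit() or c == '\''
def pvIswA (c : Char) : Bool := PySem.Chars.isalpha c || PySem.Chars.isdigit c || c = '\''

-- the loop body of A: state (arr, word, chars, cur)
def pvStepA (s : List (List Char) × List Char × List Char × Nat) (c : Char) :
    List (List Char) × List Char × List Char × Nat :=
  let (arr, word, chars, cur) := s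
  if pvIswA c then
    ((if cur = 0 then arr ++ [chars] else arr), word ++ [c], [], 1)
  else
    ((if cur = 1 then arr ++ [word] else arr), [], chars ++ [c], 0)

def getArrByText (text : String) : List String :=
  let t := pvRemoveFirstSpacesA text.toList ++ [' ']
  let st := t.foldl pvStepA ([], [], [], 0)
  let arr := st.1 ++ [st.2.2.1]
  let arr := if arr.length > 1 then arr.dropLast ++ [arr.getLast!.dropLast] else arr
  arr.map (fun l => String.ofList l)

-- ===== PORT B =====
-- text.lstrip(' ') or text
def pvRemoveFirstSpacesB (l : List Char) : List Char :=
  let s := l.dropWhile (· = ' ')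
  if s = [] then l else s

def pvIswB (c : Char) : Bool := PySem.Chars.isalpha c || PySem.Chars.isdigit c || c = '\''

-- the two while loops of B: peel maximal same-class runs (inner while = maximal extent)
def pvRunsB : List Char → List (List Char)
  | [] => []
  | c :: rest =>
      let same := rest.takeWhile (fun d => pvIswB d == pvIswB c)
      (c :: same) :: pvRunsB (rest.drop same.length)
termination_by l => l.length
decreasing_by simp

def getArrByText_alt (text : String) : List String :=
  let t := pvRemoveFirstSpacesB text.toList ++ [' ']
  let arr := pvRunsB t
  let arr := if pvIswB (t.headD ' ') then [] :: arr else arr  -- t[0]; t is never empty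
  let arr := if arr.length > 1 then arr.dropLast ++ [arr.getLast!.dropLast] else arr
  arr.map (fun l => String.ofList l)

-- ===== PRECONDITION & SPEC =====
def Spec_getArrByText (text : String) (out : List String) : Prop := out = getArrByText_alt text
instance (text : String) (out : List String) : Decidable (Spec_getArrByText text out) := by unfold Spec_getArrByText; infer_instance

-- ===== CLAIM (what is proved, stated in full; the proofs are below) =====
def Claim_equal_getArrByText : Prop := ∀ (text : String), Dom_getArrByText text → Spec_getArrByText text (getArrByText text)

-- ===== LEMMAS AND PROOFS =====

theorem pvRfsAGo_eq (l : List Char) (i : Nat) :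
    pvRfsAGo l i =
      (if (l.drop i).dropWhile (· = ' ') = [] then l else (l.drop i).dropWhile (· = ' ')) := by
  rw [pvRfsAGo]
  split
  · rename_i h
    have hd : l.drop i = l[i] :: l.drop (i + 1) := by
      rw [List.drop_eq_getElem_cons h]
    by_cases hc : l[i] = ' '
    · simp only [hc, ne_eq, not_true_eq_false, if_false]
      rw [pvRfsAGo_eq l (i + 1), hd]
      simp [hc]
    · simp only [ne_eq, hc, not_false_eq_true, if_true, hd, List.dropWhile_cons]
      simp only [decide_false, Bool.false_eq_true, if_false]
      rw [← hd]
      rw [if_neg (by simp [List.drop_eq_nil_iff]; omega)]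
  · rename_i h
    have : l.drop i = [] := List.drop_eq_nil_of_le (by omega)
    simp [this]
termination_by l.length - i

theorem pvRfs_eq (l : List Char) : pvRemoveFirstSpacesA l = pvRemoveFirstSpacesB l := by
  unfold pvRemoveFirstSpacesA pvRemoveFirstSpacesB
  rw [pvRfsAGo_eq]
  simp

theorem pvBlockW (b : List Char) (hb : b ≠ []) (hw : ∀ c ∈ b, pvIswA c = true)
    (arr : List (List Char)) (word chars : List Char) (cur : Nat) :
    b.foldl pvStepA (arr, word, chars, cur) =
      ((if cur = 0 then arr ++ [chars] else arr), word ++ b, [], 1) := by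
  induction b generalizing arr word chars cur with
  | nil => exact absurd rfl hb
  | cons c b' IH =>
    simp only [List.foldl_cons, pvStepA, hw c (by simp), if_true]
    by_cases h' : b' = []
    · subst h'; simp
    · rw [IH h' (fun d hd => hw d (by simp [hd]))]
      simp

theorem pvBlockN (b : List Char) (hb : b ≠ []) (hw : ∀ c ∈ b, pvIswA c = false)
    (arr : List (List Char)) (word chars : List Char) (cur : Nat) :
    b.foldl pvStepA (arr, word, chars, cur) =
      ((if cur = 1 then arr ++ [word] else arr), [], chars ++ b, 0) := by
  induction b generalizing arr word chars cur with
  | nil => exact absurd rfl hb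
  | cons c b' IH =>
    simp only [List.foldl_cons, pvStepA, hw c (by simp), if_false, Bool.false_eq_true]
    by_cases h' : b' = []
    · subst h'; simp
    · rw [IH h' (fun d hd => hw d (by simp [hd]))]
      simp

theorem pvGetLastD_append (l₁ l₂ : List Char) (d : Char) (h : l₂ ≠ []) :
    (l₁ ++ l₂).getLastD d = l₂.getLastD d := by
  cases hl : l₂.getLast? with
  | none => exact absurd (List.getLast?_eq_none_iff.mp hl) h
  | some a => simp [List.getLastD_eq_getLast?, List.getLast?_append, hl]

theorem pvGetLastD_all {p : Char → Bool} (l : List Char) (d : Char) (h : l ≠ [])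
    (hall : ∀ x ∈ l, p x = true) : p (l.getLastD d) = true := by
  have := List.getLast_mem (l := l) h
  rw [List.getLastD_eq_getLast?, List.getLast?_eq_some_getLast h]
  exact hall _ this


def pvOut0 (arr : List (List Char)) (chars : List Char) (t : List Char) : List (List Char) :=
  let st := t.foldl pvStepA (arr, [], chars, 0)
  st.1 ++ [st.2.2.1]

def pvOut1 (arr : List (List Char)) (word : List Char) (t : List Char) : List (List Char) :=
  let st := t.foldl pvStepA (arr, word, [], 1)
  st.1 ++ [st.2.2.1]

theorem pvDropWhile_head_false (p : Char → Bool) (l : List Char) (d : Char)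
    (h : l.dropWhile p ≠ []) : p ((l.dropWhile p).headD d) = false := by
  induction l with
  | nil => simp at h
  | cons c l' IH =>
    by_cases hc : p c
    · rw [List.dropWhile_cons_of_pos hc] at h ⊢; exact IH h
    · rw [List.dropWhile_cons_of_neg hc]
      simpa using hc

theorem pvDropLenTake (q : Char → Bool) (rest : List Char) :
    rest.drop (rest.takeWhile q).length = rest.dropWhile q := by
  induction rest with
  | nil => simp
  | cons a l IH =>
    by_cases h : q a
    · simp [h, IH]
    · simp [h]

theorem pvBeqF {a b : Bool} (h : (a == b) = false) (hb : b = true) : a = false := by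
  cases a <;> cases b <;> simp_all

theorem pvBeqT {a b : Bool} (h : (a == b) = false) (hb : b = false) : a = true := by
  cases a <;> cases b <;> simp_all

theorem pvMain (n : Nat) : ∀ t : List Char, t.length ≤ n →
    ((pvIswB (t.headD 'a') = true → pvIswB (t.getLastD ' ') = false →
      ∀ arr chars, pvOut0 arr chars t = arr ++ chars :: pvRunsB t) ∧
     (t ≠ [] → pvIswB (t.headD 'a') = false → pvIswB (t.getLastD ' ') = false →
      ∀ arr word, pvOut1 arr word t = arr ++ word :: pvRunsB t)) := by
  induction n with
  | zero =>
    intro t ht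
    have h0 : t = [] := by cases t <;> simp_all
    subst h0
    refine ⟨fun _ _ arr chars => by simp [pvOut0, pvRunsB], fun hne => absurd rfl hne⟩
  | succ n IH =>
    intro t ht
    constructor
    · -- P0 : head is word-class (or empty)
      intro hh hl arr chars
      cases t with
      | nil => simp [pvOut0, pvRunsB]
      | cons c rest =>
        have hc : pvIswB c = true := by simpa using hh
        have hsame : ∀ d ∈ rest.takeWhile (fun d => pvIswB d == pvIswB c), pvIswB d = true := by
          intro d hd
          have := List.mem_takeWhile_imp hd
          simp [hc] at this; exact this
        have hsplitT : c :: rest =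
            (c :: rest.takeWhile (fun d => pvIswB d == pvIswB c)) ++
              rest.dropWhile (fun d => pvIswB d == pvIswB c) := by
          simp [List.takeWhile_append_dropWhile]
        have hrne : rest.dropWhile (fun d => pvIswB d == pvIswB c) ≠ [] := by
          intro h0
          have hrest : rest.takeWhile (fun d => pvIswB d == pvIswB c) = rest := by
            conv_rhs => rw [← List.takeWhile_append_dropWhile
              (p := fun d => pvIswB d == pvIswB c) (l := rest)]
            rw [h0, List.append_nil]
          have hall : ∀ x ∈ c :: rest, pvIswB x = true := by
            intro x hx
            rcases List.mem_cons.mp hx with h | h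
            · subst h; exact hc
            · exact hsame x (by rw [hrest]; exact h)
          have := pvGetLastD_all (p := pvIswB) (c :: rest) ' ' (by simp) hall
          rw [hl] at this
          exact Bool.noConfusion this
        have hrhead : pvIswB
            ((rest.dropWhile (fun d => pvIswB d == pvIswB c)).headD 'a') = false := by
          exact pvBeqF (pvDropWhile_head_false (fun d => pvIswB d == pvIswB c) rest 'a' hrne) hc
        have hrlast : pvIswB
            ((rest.dropWhile (fun d => pvIswB d == pvIswB c)).getLastD ' ') = false := by
          rw [hsplitT] at hl
          rw [pvGetLastD_append _ _ _ hrne] at hl; exact hl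
        have hrlen : (rest.dropWhile (fun d => pvIswB d == pvIswB c)).length ≤ n := by
          have h1 := List.length_dropWhile_le (p := fun d => pvIswB d == pvIswB c) (l := rest)
          simp at ht; omega
        have hblk := pvBlockW (c :: rest.takeWhile (fun d => pvIswB d == pvIswB c))
          (by simp)
          (by
            intro d hd
            rcases List.mem_cons.mp hd with h | h
            · subst h; exact hc
            · exact hsame d h)
          arr [] chars 0
        have hrec := (IH _ hrlen).2 hrne hrhead hrlast (arr ++ [chars])
          (c :: rest.takeWhile (fun d => pvIswB d == pvIswB c))
        rw [if_pos rfl] at hblk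
        simp only [List.nil_append] at hblk
        unfold pvOut0
        conv_lhs => rw [hsplitT]
        rw [List.foldl_append, hblk]
        unfold pvOut1 at hrec
        rw [hrec]
        rw [pvRunsB, pvDropLenTake]
        simp
    · -- P1 : head is non-word-class, t nonempty
      intro hne hh hl arr word
      cases t with
      | nil => exact absurd rfl hne
      | cons c rest =>
        have hc : pvIswB c = false := by simpa using hh
        have hsame : ∀ d ∈ rest.takeWhile (fun d => pvIswB d == pvIswB c), pvIswB d = false := by
          intro d hd
          have := List.mem_takeWhile_imp hd
          simp [hc] at this; exact this
        have hsplitT : c :: rest =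
            (c :: rest.takeWhile (fun d => pvIswB d == pvIswB c)) ++
              rest.dropWhile (fun d => pvIswB d == pvIswB c) := by
          simp [List.takeWhile_append_dropWhile]
        have hblk := pvBlockN (c :: rest.takeWhile (fun d => pvIswB d == pvIswB c))
          (by simp)
          (by
            intro d hd
            rcases List.mem_cons.mp hd with h | h
            · subst h; exact hc
            · exact hsame d h)
          arr word [] 1
        by_cases hr0 : rest.dropWhile (fun d => pvIswB d == pvIswB c) = []
        · unfold pvOut1
          conv_lhs => rw [hsplitT]
          rw [List.foldl_append, hblk, hr0]
          rw [pvRunsB, pvDropLenTake, hr0, pvRunsB]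
          simp
        · have hrhead : pvIswB
              ((rest.dropWhile (fun d => pvIswB d == pvIswB c)).headD 'a') = true := by
            exact pvBeqT (pvDropWhile_head_false (fun d => pvIswB d == pvIswB c) rest 'a' hr0) hc
          have hrlast : pvIswB
              ((rest.dropWhile (fun d => pvIswB d == pvIswB c)).getLastD ' ') = false := by
            rw [hsplitT] at hl
            rw [pvGetLastD_append _ _ _ hr0] at hl; exact hl
          have hrlen : (rest.dropWhile (fun d => pvIswB d == pvIswB c)).length ≤ n := by
            have h1 := List.length_dropWhile_le (p := fun d => pvIswB d == pvIswB c) (l := rest)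
            simp at ht; omega
          have hrec := (IH _ hrlen).1 hrhead hrlast (arr ++ [word])
            (c :: rest.takeWhile (fun d => pvIswB d == pvIswB c))
          rw [if_pos rfl] at hblk
          simp only [List.nil_append] at hblk
          unfold pvOut1
          conv_lhs => rw [hsplitT]
          rw [List.foldl_append, hblk]
          unfold pvOut0 at hrec
          rw [hrec]
          rw [pvRunsB, pvDropLenTake]
          simp

theorem pvTop (t : List Char) (ht : t ≠ []) (hlast : pvIswB (t.getLastD ' ') = false) :
    pvOut0 [] [] t = (if pvIswB (t.headD ' ') then [] :: pvRunsB t else pvRunsB t) := by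
  cases t with
  | nil => exact absurd rfl ht
  | cons c rest =>
    by_cases hc : pvIswB c = true
    · have := (pvMain (c :: rest).length (c :: rest) le_rfl).1 (by simpa using hc) hlast [] []
      simp only [List.nil_append] at this
      rw [this]
      simp [hc]
    · have hcf : pvIswB c = false := by simpa using hc
      have hsplitT : c :: rest =
          (c :: rest.takeWhile (fun d => pvIswB d == pvIswB c)) ++
            rest.dropWhile (fun d => pvIswB d == pvIswB c) := by
        simp [List.takeWhile_append_dropWhile]
      have hblk := pvBlockN (c :: rest.takeWhile (fun d => pvIswB d == pvIswB c))
        (by simp)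
        (by
          intro d hd
          rcases List.mem_cons.mp hd with h | h
          · subst h; exact hcf
          · have := List.mem_takeWhile_imp h
            simp [hcf] at this; exact this)
        [] [] [] 0
      by_cases hr0 : rest.dropWhile (fun d => pvIswB d == pvIswB c) = []
      · unfold pvOut0
        conv_lhs => rw [hsplitT]
        rw [List.foldl_append, hblk, hr0]
        rw [pvRunsB, pvDropLenTake, hr0, pvRunsB]
        simp [hcf]
      · have hrhead : pvIswB
            ((rest.dropWhile (fun d => pvIswB d == pvIswB c)).headD 'a') = true := by
          exact pvBeqT (pvDropWhile_head_false (fun d => pvIswB d == pvIswB c) rest 'a' hr0) hcf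
        have hrlast : pvIswB
            ((rest.dropWhile (fun d => pvIswB d == pvIswB c)).getLastD ' ') = false := by
          rw [hsplitT] at hlast
          rw [pvGetLastD_append _ _ _ hr0] at hlast; exact hlast
        have hrec := (pvMain (rest.dropWhile (fun d => pvIswB d == pvIswB c)).length
            _ le_rfl).1 hrhead hrlast []
            (c :: rest.takeWhile (fun d => pvIswB d == pvIswB c))
        rw [if_neg (by decide)] at hblk
        simp only [List.nil_append] at hblk
        unfold pvOut0 at hrec ⊢
        conv_lhs => rw [hsplitT]
        rw [List.foldl_append, hblk]
        rw [hrec]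
        rw [pvRunsB, pvDropLenTake]
        simp [hcf]

-- ===== VERDICT (by name: the statement is the Claim_ definition above) =====
theorem getArrByText_spec : Claim_equal_getArrByText := by
  intro text _
  simp only [Spec_getArrByText, getArrByText, getArrByText_alt]
  rw [pvRfs_eq]
  have hlast : pvIswB ((pvRemoveFirstSpacesB text.toList ++ [' ']).getLastD ' ') = false := by
    rw [pvGetLastD_append _ _ _ (by simp)]
    decide
  have h := pvTop (pvRemoveFirstSpacesB text.toList ++ [' ']) (by simp) hlast
  unfold pvOut0 at h
  rw [h]
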